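-- pv_equiv track=rewrite | github.com/adarsh-gautam-sys/CurrAlign-AI | backend/alignment.py | compute_alignment
-- ===== SOURCE A (Python) =====
-- def _normalize(skill: str) -> str:
--     """Lowercase and strip whitespace for comparison."""
--     return skill.lower().strip()
--
-- def _contains_match(skill_a: str, skill_b: str) -> bool:
--     """
--     Check if two skills match via substring containment.
--     Returns True if either skill contains the other.
--     E.g., "machine learning" contains "learning" → True
--     """
--     a = _normalize(skill_a)
--     b = _normalize(skill_b)
--     return a in b or b in a
--
-- def compute_alignment(
--     curriculum_skills: list[str],
--     industry_skills: list[str],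
--     max_results: int = 10,
-- ) -> dict:
--     """
--     Classify skills into overlap, missing, and low-relevance categories.
--
--     Args:
--         curriculum_skills: Skills extracted from the syllabus.
--         industry_skills:   Skills extracted from job descriptions.
--         max_results:       Max number of items per category.
--
--     Returns:
--         Dict with keys: overlap, missing, low_relevance — each a list of strings.
--     """
--     # Deduplicate inputs
--     curr_set = list(dict.fromkeys(curriculum_skills))  # preserves order
--     ind_set = list(dict.fromkeys(industry_skills))
--
--     overlap = []
--     matched_curriculum = set()
--     matched_industry = set()
--
--     # ── Find overlapping skills ─────────────────────────────
--     # A curriculum skill "overlaps" with an industry skill if either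
--     # contains the other as a substring (case-insensitive).
--     for i, c_skill in enumerate(curr_set):
--         for j, i_skill in enumerate(ind_set):
--             if _contains_match(c_skill, i_skill):
--                 # Use the longer (more specific) form for display
--                 display = c_skill if len(c_skill) >= len(i_skill) else i_skill
--                 if display not in overlap:
--                     overlap.append(display)
--                 matched_curriculum.add(i)
--                 matched_industry.add(j)
--
--     # ── Missing industry skills ─────────────────────────────
--     # Skills demanded by industry but NOT covered in the curriculum.
--     missing = [
--         ind_set[j]
--         for j in range(len(ind_set))
--         if j not in matched_industry
--     ]
--
--     # ── Low-relevance curriculum topics ─────────────────────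
--     # Curriculum topics that have NO match in industry requirements.
--     low_relevance = [
--         curr_set[i]
--         for i in range(len(curr_set))
--         if i not in matched_curriculum
--     ]
--
--     return {
--         "overlap": overlap[:max_results],
--         "missing": missing[:max_results],
--         "low_relevance": low_relevance[:max_results],
--     }
-- ===== SOURCE B (Python) =====
-- def _norm(s):
--     return s.lower().strip()
--
-- def _match(a, b):
--     na, nb = _norm(a), _norm(b)
--     return na in nb or nb in na
--
-- def compute_alignment(curriculum_skills, industry_skills, max_results=10):
--     curr_set = list(dict.fromkeys(curriculum_skills))
--     ind_set = list(dict.fromkeys(industry_skills))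
--
--     # Each category is computed declaratively on its own, with no index
--     # bookkeeping: overlap as an order-preserving dedup of the display forms
--     # of all matches, missing/low_relevance by an any() relevance test.
--     overlap = list(dict.fromkeys(
--         c if len(c) >= len(i) else i
--         for c in curr_set for i in ind_set if _match(c, i)))
--     missing = [i for i in ind_set
--                if not any(_match(c, i) for c in curr_set)]
--     low_relevance = [c for c in curr_set
--                      if not any(_match(c, i) for i in ind_set)]
--
--     return {
--         "overlap": overlap[:max_results],
--         "missing": missing[:max_results],
--         "low_relevance": low_relevance[:max_results],
--     }
-- ===== Notes on version B (the rewrite author's own statement) =====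
-- stated objective: simpler
-- what changed: B computes each category independently and declaratively -- overlap as an order-preserving dedup (dict.fromkeys) of the display forms of all matches, missing and low_relevance by a per-skill any() relevance test -- instead of A's single nested loop mutating an overlap list and two matched-index sets at once.
import Mathlib
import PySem

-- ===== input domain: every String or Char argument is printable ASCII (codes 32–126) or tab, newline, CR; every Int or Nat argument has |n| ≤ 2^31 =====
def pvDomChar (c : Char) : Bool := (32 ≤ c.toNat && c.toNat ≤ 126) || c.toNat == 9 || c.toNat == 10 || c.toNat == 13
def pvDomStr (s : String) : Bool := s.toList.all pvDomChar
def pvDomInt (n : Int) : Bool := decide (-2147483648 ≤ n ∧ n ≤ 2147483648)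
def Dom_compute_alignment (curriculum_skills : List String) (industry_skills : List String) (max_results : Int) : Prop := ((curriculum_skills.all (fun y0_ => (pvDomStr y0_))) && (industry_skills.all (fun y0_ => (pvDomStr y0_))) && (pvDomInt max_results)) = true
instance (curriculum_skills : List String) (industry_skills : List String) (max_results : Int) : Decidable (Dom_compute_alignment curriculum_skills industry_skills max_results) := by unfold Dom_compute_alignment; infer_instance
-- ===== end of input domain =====

-- B computes each category independently and declaratively (dedup of display forms for
-- overlap, an any() relevance test for missing/low_relevance) instead of A's single
-- nested loop mutating three accumulators (objective: simpler, same cost).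

-- ===== PORT A =====
-- A's helpers: _normalize / _contains_match
def pvNormalize (s : String) : String := PySem.Str.strip (PySem.Str.lower s)

def pvContainsMatch (a b : String) : Bool :=
  let na := pvNormalize a
  let nb := pvNormalize b
  PySem.Str.isIn na nb || PySem.Str.isIn nb na

def compute_alignment (curriculum_skills : List String) (industry_skills : List String) (max_results : Int) : List (String × List String) :=
  let curr_set := PySem.List.dedup curriculum_skills
  let ind_set := PySem.List.dedup industry_skills
  -- nested loop: one pass mutating (overlap, matched_curriculum, matched_industry)
  let st :=
    (PySem.List.enumerate curr_set).foldl (fun st ic =>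
      (PySem.List.enumerate ind_set).foldl (fun st ji =>
        if pvContainsMatch ic.2 ji.2 then
          let display := if PySem.Str.len ji.2 ≤ PySem.Str.len ic.2 then ic.2 else ji.2
          ((if display ∈ st.1 then st.1 else st.1 ++ [display]),
           (PySem.Set.add st.2.1 ic.1, PySem.Set.add st.2.2 ji.1))
        else st) st)
      (([] : List String), (([] : PySem.Set Int), ([] : PySem.Set Int)))
  let overlap := st.1
  let matched_curriculum := st.2.1
  let matched_industry := st.2.2
  let missing :=
    ((PySem.List.pyRange 0 (PySem.List.len ind_set) 1).filter
      (fun j => !(PySem.Set.contains matched_industry j))).map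
      (fun j => PySem.List.pyGetD ind_set j "")
  let low_relevance :=
    ((PySem.List.pyRange 0 (PySem.List.len curr_set) 1).filter
      (fun i => !(PySem.Set.contains matched_curriculum i))).map
      (fun i => PySem.List.pyGetD curr_set i "")
  [("overlap", PySem.List.slice overlap none (some max_results)),
   ("missing", PySem.List.slice missing none (some max_results)),
   ("low_relevance", PySem.List.slice low_relevance none (some max_results))]

-- ===== PORT B =====
-- Source B's helpers: _norm / _match
def pvNormB (s : String) : String := PySem.Str.strip (PySem.Str.lower s)

def pvMatchB (a b : String) : Bool :=
  let na := pvNormB a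
  let nb := pvNormB b
  PySem.Str.isIn na nb || PySem.Str.isIn nb na

def compute_alignment_alt (curriculum_skills : List String) (industry_skills : List String) (max_results : Int) : List (String × List String) :=
  let curr_set := PySem.List.dedup curriculum_skills
  let ind_set := PySem.List.dedup industry_skills
  -- overlap = list(dict.fromkeys(display for c … for i … if _match(c, i)))
  let overlap := PySem.List.dedup (curr_set.flatMap (fun c =>
      (ind_set.filter (fun i => pvMatchB c i)).map
        (fun i => if PySem.Str.len i ≤ PySem.Str.len c then c else i)))
  -- missing = [i for i in ind_set if not any(_match(c, i) for c in curr_set)]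
  let missing := ind_set.filter (fun i => !(curr_set.any (fun c => pvMatchB c i)))
  -- low_relevance = [c for c in curr_set if not any(_match(c, i) for i in ind_set)]
  let low_relevance := curr_set.filter (fun c => !(ind_set.any (fun i => pvMatchB c i)))
  [("overlap", PySem.List.slice overlap none (some max_results)),
   ("missing", PySem.List.slice missing none (some max_results)),
   ("low_relevance", PySem.List.slice low_relevance none (some max_results))]

-- ===== PRECONDITION & SPEC =====
def Spec_compute_alignment (curriculum_skills : List String) (industry_skills : List String) (max_results : Int) (out : List (String × List String)) : Prop := out = compute_alignment_alt curriculum_skills industry_skills max_results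
instance (curriculum_skills : List String) (industry_skills : List String) (max_results : Int) (out : List (String × List String)) : Decidable (Spec_compute_alignment curriculum_skills industry_skills max_results out) := by unfold Spec_compute_alignment; infer_instance

-- ===== CLAIM (what is proved, stated in full; the proofs are below) =====
def Claim_equal_compute_alignment : Prop := ∀ (curriculum_skills : List String) (industry_skills : List String) (max_results : Int), Dom_compute_alignment curriculum_skills industry_skills max_results → Spec_compute_alignment curriculum_skills industry_skills max_results (compute_alignment curriculum_skills industry_skills max_results)

-- ===== LEMMAS AND PROOFS =====

-- the flattened match table carrying positions and strings (proof device)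
def pvPairsS (curr_set ind_set : List String) : List ((Int × String) × (Int × String)) :=
  (PySem.List.enumerate curr_set).flatMap (fun a =>
    ((PySem.List.enumerate ind_set).filter (fun b => pvContainsMatch a.2 b.2)).map (fun b => (a, b)))

-- A's guarded nested loop is a single fold over the flattened match table
theorem pv_foldl_nested {α β σ : Type} (L : List α) (M : List β) (q : α → β → Bool)
    (f : σ → α → β → σ) (init : σ) :
    L.foldl (fun st a => M.foldl (fun st b => if q a b then f st a b else st) st) init
      = (L.flatMap (fun a => (M.filter (q a)).map (fun b => (a, b)))).foldl
          (fun st p => f st p.1 p.2) init := by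
  induction L generalizing init with
  | nil => rfl
  | cons a L ih =>
      simp only [List.foldl_cons, List.flatMap_cons, List.foldl_append, ih]
      congr 1
      rw [List.foldl_map, PySem.List.foldl_if_eq_foldl_filter]

-- filtering enumerate by a value predicate and projecting values = filtering the list
theorem pv_enum_filter_map {β : Type} (xs : List String) (s : Int)
    (q : String → Bool) (f : String → β) :
    ((PySem.List.enumerate xs s).filter (fun b => q b.2)).map (fun b => f b.2)
      = (xs.filter q).map f := by
  induction xs generalizing s with
  | nil => rfl
  | cons x xs ih =>
      simp only [PySem.List.enumerate_cons, List.filter_cons]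
      by_cases h : q x <;> simp [h, ih]

-- flatMap over enumerate with a value-only body = flatMap over the list
theorem pv_enum_flatMap {β : Type} (xs : List String) (s : Int) (g : String → List β) :
    (PySem.List.enumerate xs s).flatMap (fun a => g a.2) = xs.flatMap g := by
  induction xs generalizing s with
  | nil => rfl
  | cons x xs ih => simp [PySem.List.enumerate_cons, ih]

-- a fold appending-if-absent is Set.ofList of the mapped list
theorem pv_foldl_mem_append_eq_ofList {α β : Type} [BEq α] [LawfulBEq α]
    (l : List β) (f : β → α) (init : PySem.Set α) :
    l.foldl (fun acc p => if f p ∈ acc then acc else acc ++ [f p]) init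
      = PySem.Set.update init (l.map f) := by
  induction l generalizing init with
  | nil => rfl
  | cons p l ih =>
      simp only [List.foldl_cons, List.map_cons, PySem.Set.update_cons]
      rw [← ih]
      congr 1
      rw [PySem.Set.add_eq_ite]
  
-- j is a matched industry index iff some curriculum skill matches ind_set[j]
theorem pv_snd_mem_iff (curr_set ind_set : List String) (k : Nat) (hk : k < ind_set.length) :
    ((k : Int) ∈ (pvPairsS curr_set ind_set).map (fun p => p.2.1))
      ↔ ∃ c ∈ curr_set, pvContainsMatch c (ind_set[k]'hk) = true := by
  unfold pvPairsS
  simp only [List.map_flatMap, List.map_map, List.mem_flatMap, List.mem_map,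
    List.mem_filter, Function.comp_def]
  constructor
  · rintro ⟨a, ha, b, ⟨hb, hm⟩, hj⟩
    rw [PySem.List.mem_enumerate_iff] at ha hb
    obtain ⟨ka, hka, ha⟩ := ha
    obtain ⟨kb, hkb, hb⟩ := hb
    rw [ha, hb] at hm
    rw [hb] at hj
    simp only [zero_add] at hj hm
    have hkbk : kb = k := by exact_mod_cast hj
    subst hkbk
    exact ⟨_, List.getElem_mem hka, hm⟩
  · rintro ⟨c, hc, hm⟩
    obtain ⟨ka, hka, rfl⟩ := List.mem_iff_getElem.mp hc
    refine ⟨((ka : Int), curr_set[ka]), ?_, ((k : Int), ind_set[k]), ⟨?_, hm⟩, rfl⟩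
    · rw [PySem.List.mem_enumerate_iff]; exact ⟨ka, hka, by simp⟩
    · rw [PySem.List.mem_enumerate_iff]; exact ⟨k, hk, by simp⟩

-- i is a matched curriculum index iff curr_set[i] matches some industry skill
theorem pv_fst_mem_iff (curr_set ind_set : List String) (k : Nat) (hk : k < curr_set.length) :
    ((k : Int) ∈ (pvPairsS curr_set ind_set).map (fun p => p.1.1))
      ↔ ∃ i ∈ ind_set, pvContainsMatch (curr_set[k]'hk) i = true := by
  unfold pvPairsS
  simp only [List.map_flatMap, List.map_map, List.mem_flatMap, List.mem_map,
    List.mem_filter, Function.comp_def]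
  constructor
  · rintro ⟨a, ha, b, ⟨hb, hm⟩, hj⟩
    rw [PySem.List.mem_enumerate_iff] at ha hb
    obtain ⟨ka, hka, ha⟩ := ha
    obtain ⟨kb, hkb, hb⟩ := hb
    rw [ha, hb] at hm
    rw [ha] at hj
    simp only [zero_add] at hj hm
    have hkak : ka = k := by exact_mod_cast hj
    subst hkak
    exact ⟨_, List.getElem_mem hkb, hm⟩
  · rintro ⟨i, hi, hm⟩
    obtain ⟨kb, hkb, rfl⟩ := List.mem_iff_getElem.mp hi
    refine ⟨((k : Int), curr_set[k]), ?_, ((kb : Int), ind_set[kb]), ⟨?_, hm⟩, rfl⟩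
    · rw [PySem.List.mem_enumerate_iff]; exact ⟨k, hk, by simp⟩
    · rw [PySem.List.mem_enumerate_iff]; exact ⟨kb, hkb, by simp⟩

-- the mapped display forms of the match table are Source B's overlap generator
theorem pv_display_list (curr_set ind_set : List String) :
    (pvPairsS curr_set ind_set).map
        (fun p => if PySem.Str.len p.2.2 ≤ PySem.Str.len p.1.2 then p.1.2 else p.2.2)
      = curr_set.flatMap (fun c =>
          (ind_set.filter (fun i => pvMatchB c i)).map
            (fun i => if PySem.Str.len i ≤ PySem.Str.len c then c else i)) := by
  unfold pvPairsS
  rw [List.map_flatMap, ← pv_enum_flatMap curr_set 0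
    (g := fun c => (ind_set.filter (fun i => pvMatchB c i)).map
            (fun i => if PySem.Str.len i ≤ PySem.Str.len c then c else i))]
  refine List.flatMap_congr (fun a _ => ?_)
  rw [List.map_map]
  exact pv_enum_filter_map ind_set 0 (fun i => pvContainsMatch a.2 i)
    (fun i => if PySem.Str.len i ≤ PySem.Str.len a.2 then a.2 else i)

-- A's range-indexed "missing"/"low_relevance" comprehension, with the matched set
-- characterised by `mem`, equals a value-level filter of the list
theorem pv_range_filter (xs : List String) (S : PySem.Set Int) (p : String → Bool)
    (h : ∀ (k : Nat) (hk : k < xs.length), (((k : Int)) ∈ S ↔ ¬ p (xs[k]'hk) = true)) :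
    ((PySem.List.pyRange 0 (PySem.List.len xs) 1).filter
      (fun j => !(PySem.Set.contains S j))).map (fun j => PySem.List.pyGetD xs j "")
      = xs.filter p := by
  rw [show ((PySem.List.pyRange 0 (PySem.List.len xs) 1).filter
      (fun j => !(PySem.Set.contains S j))).map (fun j => PySem.List.pyGetD xs j "")
    = ((PySem.List.enumerate xs).filter (fun js => !(PySem.Set.contains S js.1))).map
        (fun js => js.2) by
      rw [PySem.List.enumerate_eq_map_pyRange xs "", List.filter_map, List.map_map]; rfl]
  have hcg : ∀ js ∈ PySem.List.enumerate xs (0 : Int),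
      (!(PySem.Set.contains S js.1)) = p js.2 := by
    intro js hjs
    rw [PySem.List.mem_enumerate_iff] at hjs
    obtain ⟨k, hk, rfl⟩ := hjs
    simp only [zero_add]
    by_cases hp : p xs[k] = true
    · have hnot : ((k : Int)) ∉ S := fun hmem => ((h k hk).mp hmem) hp
      simp [hnot, hp]
    · have hmem : ((k : Int)) ∈ S := (h k hk).mpr hp
      simp [hmem]
      exact Bool.eq_false_iff.mpr hp
  rw [List.filter_congr hcg]
  have := pv_enum_filter_map xs 0 p (fun x => x)
  simpa using this

-- Bool normal form bridging '∨' and simp's '→' form of any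
theorem pv_bool_or_imp (a b : Bool) : (a = true ∨ b = true) ↔ (a = false → b = true) := by
  cases a <;> cases b <;> simp

-- ===== VERDICT (by name: the statement is the Claim_ definition above) =====
theorem compute_alignment_spec : Claim_equal_compute_alignment := by
  intro cs is_ ms _h
  unfold Spec_compute_alignment
  simp only [compute_alignment, compute_alignment_alt]
  rw [pv_foldl_nested (q := fun a b => pvContainsMatch a.2 b.2)
        (f := fun st (a : Int × String) (b : Int × String) =>
          ((if (if PySem.Str.len b.2 ≤ PySem.Str.len a.2 then a.2 else b.2) ∈ st.1 then st.1
            else st.1 ++ [if PySem.Str.len b.2 ≤ PySem.Str.len a.2 then a.2 else b.2]),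
           (PySem.Set.add st.2.1 a.1, PySem.Set.add st.2.2 b.1)))]
  rw [show ((PySem.List.enumerate (PySem.List.dedup cs)).flatMap (fun a =>
        ((PySem.List.enumerate (PySem.List.dedup is_)).filter
          (fun b => pvContainsMatch a.2 b.2)).map (fun b => (a, b))))
      = pvPairsS (PySem.List.dedup cs) (PySem.List.dedup is_) from rfl]
  rw [PySem.List.foldl_prod_mk
        (f := fun acc (p : (Int × String) × (Int × String)) =>
          if (if PySem.Str.len p.2.2 ≤ PySem.Str.len p.1.2 then p.1.2 else p.2.2) ∈ acc then acc
          else acc ++ [if PySem.Str.len p.2.2 ≤ PySem.Str.len p.1.2 then p.1.2 else p.2.2])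
        (g := fun (s : PySem.Set Int × PySem.Set Int) p =>
          (PySem.Set.add s.1 p.1.1, PySem.Set.add s.2 p.2.1))]
  rw [PySem.List.foldl_prod_mk
        (f := fun (s : PySem.Set Int) (p : (Int × String) × (Int × String)) => PySem.Set.add s p.1.1)
        (g := fun (s : PySem.Set Int) (p : (Int × String) × (Int × String)) => PySem.Set.add s p.2.1)]
  congr 1
  -- overlap
  · rw [pv_foldl_mem_append_eq_ofList _ _ [], PySem.Set.update_nil_left, pv_display_list]
    simp [PySem.List.dedup_eq_ofList]
  congr 1
  -- missing
  · rw [show (pvPairsS (PySem.List.dedup cs) (PySem.List.dedup is_)).foldl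
          (fun s p => PySem.Set.add s p.2.1) []
        = PySem.Set.ofList ((pvPairsS (PySem.List.dedup cs) (PySem.List.dedup is_)).map
            (fun p => p.2.1)) by rw [PySem.Set.ofList_eq_foldl, List.foldl_map]]
    rw [pv_range_filter _ _
      (fun i => !((PySem.List.dedup cs).any (fun c => pvMatchB c i)))
      (fun k hk => by
        rw [PySem.Set.mem_ofList, pv_snd_mem_iff _ _ k hk]
        simp [pvMatchB, pvContainsMatch, pvNormB, pvNormalize, pv_bool_or_imp])]
  -- low_relevance
  · rw [show (pvPairsS (PySem.List.dedup cs) (PySem.List.dedup is_)).foldl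
          (fun s p => PySem.Set.add s p.1.1) []
        = PySem.Set.ofList ((pvPairsS (PySem.List.dedup cs) (PySem.List.dedup is_)).map
            (fun p => p.1.1)) by rw [PySem.Set.ofList_eq_foldl, List.foldl_map]]
    rw [pv_range_filter _ _
      (fun c => !((PySem.List.dedup is_).any (fun i => pvMatchB c i)))
      (fun k hk => by
        rw [PySem.Set.mem_ofList, pv_fst_mem_iff _ _ k hk]
        simp [pvMatchB, pvContainsMatch, pvNormB, pvNormalize, pv_bool_or_imp])]
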